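-- pv_equiv track=rewrite | github.com/StefanSchlee/ti_clang_linkinfo_analysis | src/ti_clang_linkinfo_analysis/linkinfo_graph.py | _find_best_matching_manual_folder
-- ===== SOURCE A (Python) =====
-- from typing import Dict, List, Tuple, Optional, Set
--
-- def _find_best_matching_manual_folder(
--     file_parent_folder: str, manual_folders: List[str]
-- ) -> Optional[str]:
--     """Find the best matching manual folder for a file parent folder.
--
--     Uses longest-prefix matching so nested folder paths map deterministically
--     to the most specific manual folder.
--
--     Args:
--         file_parent_folder: Normalized parent folder for an input file.
--         manual_folders: Normalized manual folder paths.
--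
--     Returns:
--         Best matching manual folder path, or None if no match exists.
--     """
--     matches = [
--         folder_path
--         for folder_path in manual_folders
--         if file_parent_folder == folder_path
--         or file_parent_folder.startswith(folder_path + "/")
--     ]
--     if not matches:
--         return None
--     return max(matches, key=lambda p: (len(p), p))
-- ===== SOURCE B (Python) =====
-- def _find_best_matching_manual_folder(file_parent_folder, manual_folders):
--     """Walk the ancestor prefixes of file_parent_folder from longest to
--     shortest and return the first one that is a manual folder."""
--     folder_set = set(manual_folders)
--     if file_parent_folder in folder_set:
--         return file_parent_folder
--     for i in range(len(file_parent_folder) - 1, -1, -1):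
--         if file_parent_folder[i] == "/" and file_parent_folder[:i] in folder_set:
--             return file_parent_folder[:i]
--     return None
-- ===== Notes on version B (the rewrite author's own statement) =====
-- stated objective: alternative
-- what changed: Instead of filtering all manual folders by a per-folder prefix test and taking max by (len, path), B builds a set of the manual folders once and walks the ancestor prefixes of file_parent_folder from longest to shortest (scanning for '/' boundaries right-to-left), returning the first ancestor found in the set.
import Mathlib
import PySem

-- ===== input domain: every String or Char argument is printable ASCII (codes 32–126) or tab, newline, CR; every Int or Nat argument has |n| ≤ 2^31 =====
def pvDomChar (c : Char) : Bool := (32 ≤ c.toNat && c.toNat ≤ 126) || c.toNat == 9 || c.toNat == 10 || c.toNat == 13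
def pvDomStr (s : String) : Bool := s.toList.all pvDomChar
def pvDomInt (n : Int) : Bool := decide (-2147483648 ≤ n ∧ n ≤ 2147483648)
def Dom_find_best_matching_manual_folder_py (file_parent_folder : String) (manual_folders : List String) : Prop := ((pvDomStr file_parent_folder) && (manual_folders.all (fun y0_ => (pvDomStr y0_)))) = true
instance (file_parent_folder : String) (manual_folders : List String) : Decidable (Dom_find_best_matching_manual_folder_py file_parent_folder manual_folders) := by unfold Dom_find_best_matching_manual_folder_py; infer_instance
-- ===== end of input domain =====

-- ===== PORT A =====
-- B replaces the filter+max(len,path) over manual_folders by a set lookup along the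
-- ancestor '/'-boundary prefixes of file_parent_folder, longest first (return value only; no mutation).
def find_best_matching_manual_folder_py (file_parent_folder : String) (manual_folders : List String) : Option String :=
  -- matches = [folder_path for folder_path in manual_folders if ...]
  -- 'folder_path + "/"' is ported on code points (exact: String.toList respects ++)
  let matchesList := manual_folders.filter (fun folder_path =>
    file_parent_folder == folder_path
      || PySem.Chars.startswith file_parent_folder.toList (folder_path.toList ++ ['/']))
  if matchesList.isEmpty then none
  else PySem.List.max2? matchesList (fun p => PySem.Str.len p) (fun p => p)

-- ===== PORT B =====
-- the 'for i in range(len(file_parent_folder) - 1, -1, -1)' loop with early return,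
-- as structural recursion on i (fuel i+1 handles index i)
def pvAltGo (file_parent_folder : String) (folder_set : PySem.Set String) : Nat → Option String
  | 0 => none
  | i + 1 =>
    if PySem.Str.pyGet? file_parent_folder (i : Int) == some '/'
        && folder_set.contains (PySem.Str.slice file_parent_folder none (some (i : Int))) then
      some (PySem.Str.slice file_parent_folder none (some (i : Int)))
    else pvAltGo file_parent_folder folder_set i

def find_best_matching_manual_folder_py_alt (file_parent_folder : String) (manual_folders : List String) : Option String :=
  let folder_set := PySem.Set.ofList manual_folders
  if folder_set.contains file_parent_folder then some file_parent_folder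
  else pvAltGo file_parent_folder folder_set file_parent_folder.toList.length

-- ===== PRECONDITION & SPEC =====
def Spec_find_best_matching_manual_folder_py (file_parent_folder : String) (manual_folders : List String) (out : Option String) : Prop := out = find_best_matching_manual_folder_py_alt file_parent_folder manual_folders
instance (file_parent_folder : String) (manual_folders : List String) (out : Option String) : Decidable (Spec_find_best_matching_manual_folder_py file_parent_folder manual_folders out) := by unfold Spec_find_best_matching_manual_folder_py; infer_instance

-- ===== CLAIM (what is proved, stated in full; the proofs are below) =====
def Claim_equal_find_best_matching_manual_folder_py : Prop := ∀ (file_parent_folder : String) (manual_folders : List String), Dom_find_best_matching_manual_folder_py file_parent_folder manual_folders → Spec_find_best_matching_manual_folder_py file_parent_folder manual_folders (find_best_matching_manual_folder_py file_parent_folder manual_folders)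

-- ===== LEMMAS AND PROOFS =====

lemma pvSlice_eq_ofList_take (s : String) (j : Nat) :
    PySem.Str.slice s none (some (j : Int)) = String.ofList (s.toList.take j) := by
  apply String.toList_inj.mp
  simp [PySem.Str.toList_slice, PySem.Chars.slice_eq_listSlice, PySem.List.slice_to]

lemma pvPrefix_slash_iff (l cs : List Char) :
    l ++ ['/'] <+: cs ↔ (l <+: cs ∧ cs[l.length]? = some '/') := by
  constructor
  · rintro ⟨t, ht⟩
    subst ht
    rw [List.append_assoc]
    refine ⟨⟨'/' :: t, by simp⟩, ?_⟩
    rw [List.getElem?_append_right (le_refl _)]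
    simp
  · rintro ⟨⟨t, ht⟩, hc⟩
    subst ht
    rw [List.getElem?_append_right (le_refl _)] at hc
    simp at hc
    match t, hc with
    | c :: t', hc => exact ⟨t', by simp_all⟩

lemma pvMatch_iff (s f : String) :
    ((s == f) || PySem.Chars.startswith s.toList (f.toList ++ ['/'])) = true ↔
      (f.toList <+: s.toList ∧
        (f.toList.length = s.toList.length ∨ s.toList[f.toList.length]? = some '/')) := by
  rw [Bool.or_eq_true, beq_iff_eq, PySem.Chars.startswith_iff, pvPrefix_slash_iff]
  constructor
  · rintro (rfl | ⟨h1, h2⟩)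
    · exact ⟨List.prefix_refl _, Or.inl rfl⟩
    · exact ⟨h1, Or.inr h2⟩
  · rintro ⟨h1, (he | h2)⟩
    · left
      apply String.toList_inj.mp
      exact (List.IsPrefix.eq_of_length h1 he).symm ▸ rfl
    · exact Or.inr ⟨h1, h2⟩

lemma pvCond_iff (s : String) (fs : PySem.Set String) (i : Nat) :
    (PySem.Str.pyGet? s (i : Int) == some '/'
        && fs.contains (PySem.Str.slice s none (some (i : Int)))) = true ↔
      (s.toList[i]? = some '/' ∧ String.ofList (s.toList.take i) ∈ fs) := by
  rw [Bool.and_eq_true, beq_iff_eq, pvSlice_eq_ofList_take, PySem.Set.contains_iff,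
    PySem.Str.pyGet?_natCast]

lemma pvAltGo_none (s : String) (fs : PySem.Set String) (i : Nat)
    (h : pvAltGo s fs i = none) :
    ∀ j < i, ¬ (s.toList[j]? = some '/' ∧ String.ofList (s.toList.take j) ∈ fs) := by
  induction i with
  | zero => omega
  | succ i ih =>
    rw [pvAltGo] at h
    split at h
    · exact absurd h (by simp)
    · rename_i hc
      intro j hj
      rcases Nat.lt_succ_iff_lt_or_eq.mp hj with hj' | rfl
      · exact ih h j hj'
      · exact fun hx => hc ((pvCond_iff s fs j).mpr hx)

lemma pvAltGo_some (s : String) (fs : PySem.Set String) (i : Nat) (r : String)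
    (h : pvAltGo s fs i = some r) :
    ∃ j < i, s.toList[j]? = some '/' ∧ r = String.ofList (s.toList.take j) ∧ r ∈ fs ∧
      ∀ j', j < j' → j' < i → ¬ (s.toList[j']? = some '/' ∧ String.ofList (s.toList.take j') ∈ fs) := by
  induction i with
  | zero => simp [pvAltGo] at h
  | succ i ih =>
    rw [pvAltGo] at h
    split at h
    · rename_i hc
      rw [pvCond_iff] at hc
      obtain ⟨h1, h2⟩ := hc
      have hr : r = String.ofList (s.toList.take i) := by
        simpa [pvSlice_eq_ofList_take] using h.symm
      exact ⟨i, Nat.lt_succ_self i, h1, hr, hr ▸ h2, by omega⟩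
    · rename_i hc
      obtain ⟨j, hj, h1, h2, h3, h4⟩ := ih h
      refine ⟨j, Nat.lt_succ_of_lt hj, h1, h2, h3, ?_⟩
      intro j' hjj' hj'
      rcases Nat.lt_succ_iff_lt_or_eq.mp hj' with hj'' | rfl
      · exact h4 j' hjj' hj''
      · exact fun hx => hc ((pvCond_iff s fs j').mpr hx)

lemma pvFoldl_max_unique (r : String) (f : Option String → String → Option String)
    (h1 : ∀ x, f none x = some x)
    (h2 : ∀ x, (x = r ∨ PySem.Str.len x < PySem.Str.len r) → f (some r) x = some r)
    (h3 : ∀ m x, PySem.Str.len m < PySem.Str.len r → PySem.Str.len x < PySem.Str.len r →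
        (f (some m) x = some x ∨ f (some m) x = some m))
    (h4 : ∀ m, PySem.Str.len m < PySem.Str.len r → f (some m) r = some r) :
    ∀ (xs : List String) (acc : Option String),
    (∀ x ∈ xs, x = r ∨ PySem.Str.len x < PySem.Str.len r) →
    (acc = some r ∨ (r ∈ xs ∧ (acc = none ∨ ∃ m, acc = some m ∧ PySem.Str.len m < PySem.Str.len r))) →
    List.foldl f acc xs = some r := by
  intro xs
  induction xs with
  | nil =>
    rintro acc _ (rfl | ⟨hr, _⟩)
    · rfl
    · simp at hr
  | cons x t ih =>
    rintro acc hall hinv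
    rw [List.foldl_cons]
    have hx := hall x (List.mem_cons_self ..)
    have hall' : ∀ y ∈ t, y = r ∨ PySem.Str.len y < PySem.Str.len r :=
      fun y hy => hall y (List.mem_cons_of_mem _ hy)
    have hlen : ∀ y : String, PySem.Str.len y < PySem.Str.len r → y ≠ r := by
      intro y hy hyr; subst hyr; exact absurd hy (lt_irrefl _)
    rcases hinv with rfl | ⟨hrmem, hacc⟩
    · exact ih (f (some r) x) hall' (Or.inl (by rw [h2 x hx]))
    · rcases hacc with rfl | ⟨m, rfl, hm⟩
      · rw [h1]
        rcases hx with rfl | hlt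
        · exact ih _ hall' (Or.inl rfl)
        · refine ih _ hall' (Or.inr ⟨?_, Or.inr ⟨x, rfl, hlt⟩⟩)
          rcases List.mem_cons.mp hrmem with rfl | h
          · exact absurd rfl (hlen _ hlt)
          · exact h
      · rcases hx with rfl | hlt
        · exact ih _ hall' (Or.inl (by rw [h4 m hm]))
        · have hrt : r ∈ t := by
            rcases List.mem_cons.mp hrmem with rfl | h
            · exact absurd rfl (hlen _ hlt)
            · exact h
          rcases h3 m x hm hlt with he | he <;>
            exact ih _ hall' (Or.inr ⟨hrt, Or.inr ⟨_, he, by assumption⟩⟩)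

lemma pvMax2_unique (xs : List String) (r : String) (hmem : r ∈ xs)
    (h : ∀ x ∈ xs, x = r ∨ PySem.Str.len x < PySem.Str.len r) :
    PySem.List.max2? xs (fun p => PySem.Str.len p) (fun p => p) = some r := by
  unfold PySem.List.max2?
  apply pvFoldl_max_unique r _ _ _ _ _ xs none h (Or.inr ⟨hmem, Or.inl rfl⟩)
  · intro x; rfl
  · rintro x (rfl | hlt)
    · simp
    · have h1 : x.length < r.length := by simpa using hlt
      simp
      rintro (h' | ⟨h', -⟩) <;> omega
  · intro m x hm hx
    split
    · left; rfl
    · rename_i acc m' heq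
      injection heq with heq
      subst heq
      split
      · left; rfl
      · right; rfl
  · intro m hm
    have h1 : m.length < r.length := by simpa using hm
    simp
    intro h' _
    omega


-- ===== VERDICT (by name: the statement is the Claim_ definition above) =====
theorem find_best_matching_manual_folder_py_spec : Claim_equal_find_best_matching_manual_folder_py := by
  intro s mf _hdom
  unfold Spec_find_best_matching_manual_folder_py
  unfold find_best_matching_manual_folder_py find_best_matching_manual_folder_py_alt
  simp only []
  set P : String → Bool := fun folder_path =>
    (s == folder_path) || PySem.Chars.startswith s.toList (folder_path.toList ++ ['/']) with hP
  by_cases hs : (PySem.Set.ofList mf).contains s = true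
  · -- file_parent_folder itself is a manual folder: both return some s
    rw [if_pos hs]
    have hsmem : s ∈ mf := (PySem.Set.mem_ofList mf s).mp ((PySem.Set.contains_iff _ _).mp hs)
    have hPs : P s = true := (pvMatch_iff s s).mpr ⟨List.prefix_refl _, Or.inl rfl⟩
    have hmem : s ∈ mf.filter P := List.mem_filter.mpr ⟨hsmem, hPs⟩
    rw [if_neg (by simp only [List.isEmpty_iff]; exact List.ne_nil_of_mem hmem)]
    apply pvMax2_unique _ _ hmem
    intro f hf
    obtain ⟨hpre, hcand⟩ := (pvMatch_iff s f).mp (List.mem_filter.mp hf).2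
    rcases hcand with hn | hsl
    · exact Or.inl (String.toList_inj.mp (List.IsPrefix.eq_of_length hpre hn))
    · right
      have h1 : f.toList.length < s.toList.length := List.getElem?_eq_some_iff.mp hsl |>.1
      simp only [PySem.Str.len_eq]
      omega
  · rw [if_neg hs]
    have hsnot : s ∉ mf := fun h => hs ((PySem.Set.contains_iff _ _).mpr ((PySem.Set.mem_ofList mf s).mpr h))
    -- any match is a strict '/'-boundary prefix found by the descending scan
    have hmatch : ∀ f ∈ mf.filter P, ∃ j, j < s.toList.length ∧ s.toList[j]? = some '/' ∧
        f = String.ofList (s.toList.take j) ∧ f ∈ PySem.Set.ofList mf := by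
      intro f hf
      obtain ⟨hfmf, hfP⟩ := List.mem_filter.mp hf
      obtain ⟨hpre, hcand⟩ := (pvMatch_iff s f).mp hfP
      rcases hcand with hn | hsl
      · exact absurd (String.toList_inj.mp (List.IsPrefix.eq_of_length hpre hn) ▸ hfmf) hsnot
      · have hlt : f.toList.length < s.toList.length := List.getElem?_eq_some_iff.mp hsl |>.1
        have htake : f.toList = s.toList.take f.toList.length := (List.prefix_iff_eq_take.mp hpre)
        refine ⟨f.toList.length, hlt, hsl, ?_, (PySem.Set.mem_ofList mf f).mpr hfmf⟩
        apply String.toList_inj.mp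
        rw [String.toList_ofList]
        exact htake
    cases hgo : pvAltGo s (PySem.Set.ofList mf) s.toList.length with
    | none =>
      -- no boundary prefix is a manual folder: no match at all
      have hnil : mf.filter P = [] := by
        rcases hq : mf.filter P with - | ⟨f, t⟩
        · rfl
        · obtain ⟨j, hj, hsl, rfl, hfs⟩ := hmatch f (hq ▸ List.mem_cons_self ..)
          exact absurd ⟨hsl, hfs⟩ (pvAltGo_none s _ _ hgo j hj)
      rw [hnil]
      simp
    | some r =>
      obtain ⟨j, hj, hsl, hr, hrfs, hbest⟩ := pvAltGo_some s _ _ r hgo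
      have hrP : P r = true := by
        apply (pvMatch_iff s r).mpr
        have hlen : r.toList.length = j := by
          rw [hr, String.toList_ofList, List.length_take]; omega
        constructor
        · rw [hr]; simp only [String.toList_ofList]; exact List.take_prefix _ _
        · right; rw [hlen]; exact hsl
      have hrmem : r ∈ mf.filter P :=
        List.mem_filter.mpr ⟨(PySem.Set.mem_ofList mf r).mp hrfs, hrP⟩
      rw [if_neg (by simp only [List.isEmpty_iff]; exact List.ne_nil_of_mem hrmem)]
      apply pvMax2_unique _ _ hrmem
      intro f hf
      obtain ⟨jf, hjf, hslf, rfl, hffs⟩ := hmatch f hf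
      have hle : jf ≤ j := by
        by_contra hgt
        exact hbest jf (by omega) hjf ⟨hslf, hffs⟩
      rcases Nat.lt_or_ge jf j with hltj | hgej
      · right
        rw [hr]
        simp only [PySem.Str.len_eq, String.toList_ofList, List.length_take]
        omega
      · left
        have hje : jf = j := by omega
        rw [hr, hje]
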